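-- pv_equiv track=rewrite | github.com/spac-null/disability-ai-collective | disability_discovery_crawler_simple.py | _suggest_agent
-- ===== SOURCE A (Python) =====
-- from typing import Dict, List, Optional
--
-- def _suggest_agent(finding: Dict) -> str:
--     """Suggest which Disability-AI agent would be best for this article"""
--     keywords = finding.get('keywords', [])
--
--     if any(k in keywords for k in ['deaf', 'blind', 'sensory', 'visual', 'hearing']):
--         return 'Pixel Nova or Siri Sage'
--     elif any(k in keywords for k in ['neurodiverse', 'autistic', 'adhd', 'cognitive']):
--         return 'Zen Circuit'
--     elif any(k in keywords for k in ['accessibility', 'mobility', 'wheelchair', 'barrier']):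
--         return 'Maya Flux'
--     else:
--         return 'Any agent'
-- ===== SOURCE B (Python) =====
-- _CATEGORY_RANK = {
--     'deaf': 0, 'blind': 0, 'sensory': 0, 'visual': 0, 'hearing': 0,
--     'neurodiverse': 1, 'autistic': 1, 'adhd': 1, 'cognitive': 1,
--     'accessibility': 2, 'mobility': 2, 'wheelchair': 2, 'barrier': 2,
-- }
--
-- def _agent_of(rank):
--     if rank == 0:
--         return 'Pixel Nova or Siri Sage'
--     if rank == 1:
--         return 'Zen Circuit'
--     if rank == 2:
--         return 'Maya Flux'
--     return 'Any agent'
--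
-- def _suggest_agent(finding):
--     """Single pass over the keywords, keeping the best (lowest) category rank."""
--     best = 3
--     for k in finding.get('keywords', []):
--         r = _CATEGORY_RANK.get(k, 3)
--         if r < best:
--             best = r
--     return _agent_of(best)
-- ===== Notes on version B (the rewrite author's own statement) =====
-- stated objective: alternative
-- what changed: Replaces the three any()-membership scans over the keyword list with one single pass over the keywords that keeps the minimum category rank from a lookup table, then maps the rank to the agent name.
import Mathlib
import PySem

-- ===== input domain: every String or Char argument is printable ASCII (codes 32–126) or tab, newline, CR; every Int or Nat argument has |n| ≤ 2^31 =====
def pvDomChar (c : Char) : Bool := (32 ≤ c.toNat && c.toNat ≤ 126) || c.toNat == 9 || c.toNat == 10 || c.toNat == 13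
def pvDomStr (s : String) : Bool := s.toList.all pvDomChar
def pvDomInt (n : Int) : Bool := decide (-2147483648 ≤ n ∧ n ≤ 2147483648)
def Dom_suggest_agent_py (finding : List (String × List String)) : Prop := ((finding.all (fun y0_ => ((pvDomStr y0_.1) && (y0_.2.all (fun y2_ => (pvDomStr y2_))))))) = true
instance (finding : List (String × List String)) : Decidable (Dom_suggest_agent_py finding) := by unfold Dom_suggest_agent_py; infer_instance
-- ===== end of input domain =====

-- B replaces A's three any()-membership scans of the keyword list by one pass over the keywords keeping the minimum category rank (alternative decomposition, same cost class).

-- ===== PORT A =====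
def suggest_agent_py (finding : List (String × List String)) : String :=
  let keywords := (PySem.Dict.mk finding).getD "keywords" []
  if (["deaf", "blind", "sensory", "visual", "hearing"].any (fun k => keywords.contains k)) then
    "Pixel Nova or Siri Sage"
  else if (["neurodiverse", "autistic", "adhd", "cognitive"].any (fun k => keywords.contains k)) then
    "Zen Circuit"
  else if (["accessibility", "mobility", "wheelchair", "barrier"].any (fun k => keywords.contains k)) then
    "Maya Flux"
  else
    "Any agent"

-- ===== PORT B =====
def categoryRankTable : PySem.Dict String Int := PySem.Dict.mk
  [("deaf", 0), ("blind", 0), ("sensory", 0), ("visual", 0), ("hearing", 0),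
   ("neurodiverse", 1), ("autistic", 1), ("adhd", 1), ("cognitive", 1),
   ("accessibility", 2), ("mobility", 2), ("wheelchair", 2), ("barrier", 2)]

def agent_of (rank : Int) : String :=
  if rank = 0 then "Pixel Nova or Siri Sage"
  else if rank = 1 then "Zen Circuit"
  else if rank = 2 then "Maya Flux"
  else "Any agent"

def suggest_agent_py_alt (finding : List (String × List String)) : String :=
  let keywords := (PySem.Dict.mk finding).getD "keywords" []
  let best := keywords.foldl (fun best k =>
    let r := categoryRankTable.getD k 3
    if r < best then r else best) 3
  agent_of best

-- ===== PRECONDITION & SPEC =====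
def Spec_suggest_agent_py (finding : List (String × List String)) (out : String) : Prop := out = suggest_agent_py_alt finding
instance (finding : List (String × List String)) (out : String) : Decidable (Spec_suggest_agent_py finding out) := by unfold Spec_suggest_agent_py; infer_instance

-- ===== CLAIM (what is proved, stated in full; the proofs are below) =====
def Claim_equal_suggest_agent_py : Prop := ∀ (finding : List (String × List String)), Dom_suggest_agent_py finding → Spec_suggest_agent_py finding (suggest_agent_py finding)

-- ===== LEMMAS AND PROOFS =====

-- rank of a single keyword, characterised as an if-chain over the three category lists
lemma rank_eq (k : String) : categoryRankTable.getD k 3 =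
    (if k ∈ ["deaf", "blind", "sensory", "visual", "hearing"] then 0
     else if k ∈ ["neurodiverse", "autistic", "adhd", "cognitive"] then 1
     else if k ∈ ["accessibility", "mobility", "wheelchair", "barrier"] then 2
     else 3) := by
  by_cases h0 : k = "deaf"
  · subst h0; decide
  by_cases h1 : k = "blind"
  · subst h1; decide
  by_cases h2 : k = "sensory"
  · subst h2; decide
  by_cases h3 : k = "visual"
  · subst h3; decide
  by_cases h4 : k = "hearing"
  · subst h4; decide
  by_cases h5 : k = "neurodiverse"
  · subst h5; decide
  by_cases h6 : k = "autistic"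
  · subst h6; decide
  by_cases h7 : k = "adhd"
  · subst h7; decide
  by_cases h8 : k = "cognitive"
  · subst h8; decide
  by_cases h9 : k = "accessibility"
  · subst h9; decide
  by_cases h10 : k = "mobility"
  · subst h10; decide
  by_cases h11 : k = "wheelchair"
  · subst h11; decide
  by_cases h12 : k = "barrier"
  · subst h12; decide
  simp [categoryRankTable, PySem.Dict.getD_eq_get?_getD, PySem.Dict.get?,
    h0, h1, h2, h3, h4, h5, h6, h7, h8, h9, h10, h11, h12,
    Ne.symm h0, Ne.symm h1, Ne.symm h2, Ne.symm h3, Ne.symm h4, Ne.symm h5, Ne.symm h6,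
    Ne.symm h7, Ne.symm h8, Ne.symm h9, Ne.symm h10, Ne.symm h11, Ne.symm h12]

lemma rank_cases (k : String) : categoryRankTable.getD k 3 = 0 ∨ categoryRankTable.getD k 3 = 1 ∨
    categoryRankTable.getD k 3 = 2 ∨ categoryRankTable.getD k 3 = 3 := by
  rw [rank_eq]; split_ifs <;> simp

def rankChain (ks : List String) : Int :=
  if ks.any (fun k => decide (k ∈ ["deaf", "blind", "sensory", "visual", "hearing"])) then 0
  else if ks.any (fun k => decide (k ∈ ["neurodiverse", "autistic", "adhd", "cognitive"])) then 1
  else if ks.any (fun k => decide (k ∈ ["accessibility", "mobility", "wheelchair", "barrier"])) then 2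
  else 3

lemma rankChain_cases (ks : List String) : rankChain ks = 0 ∨ rankChain ks = 1 ∨
    rankChain ks = 2 ∨ rankChain ks = 3 := by
  unfold rankChain; split_ifs <;> simp

set_option maxHeartbeats 2000000 in
lemma rankChain_cons (k : String) (ks : List String) :
    rankChain (k :: ks) = min (categoryRankTable.getD k 3) (rankChain ks) := by
  rw [rank_eq]
  simp only [rankChain, List.any_cons]
  by_cases a0 : k ∈ ["deaf", "blind", "sensory", "visual", "hearing"] <;>
  by_cases a1 : k ∈ ["neurodiverse", "autistic", "adhd", "cognitive"] <;>
  by_cases a2 : k ∈ ["accessibility", "mobility", "wheelchair", "barrier"] <;>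
  by_cases b0 : ks.any (fun k => decide (k ∈ ["deaf", "blind", "sensory", "visual", "hearing"])) = true <;>
  by_cases b1 : ks.any (fun k => decide (k ∈ ["neurodiverse", "autistic", "adhd", "cognitive"])) = true <;>
  by_cases b2 : ks.any (fun k => decide (k ∈ ["accessibility", "mobility", "wheelchair", "barrier"])) = true <;>
  simp_all <;> (try split_ifs) <;> simp_all

def rankStep (best : Int) (k : String) : Int :=
  if categoryRankTable.getD k 3 < best then categoryRankTable.getD k 3 else best

lemma foldl_rank (ks : List String) (b : Int) (hb : b ≤ 3) :
    ks.foldl rankStep b = min b (rankChain ks) := by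
  induction ks generalizing b with
  | nil =>
    have h : rankChain [] = 3 := by decide
    rw [h]; simp only [List.foldl_nil]; omega
  | cons k ks ih =>
    have hk := rank_cases k
    rw [List.foldl_cons, rankChain_cons, ih (rankStep b k) (by unfold rankStep; omega)]
    unfold rankStep
    rcases rankChain_cases ks with h | h | h | h <;> rw [h] <;> split_ifs <;> omega

lemma any_comm (c ks : List String) :
    c.any (fun k => ks.contains k) = ks.any (fun k => decide (k ∈ c)) := by
  rcases Bool.eq_false_or_eq_true (ks.any (fun k => decide (k ∈ c))) with h | h <;> rw [h]
  · rw [List.any_eq_true] at h ⊢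
    obtain ⟨w, hw, hm⟩ := h
    exact ⟨w, by simpa using hm, List.contains_iff_mem.mpr hw⟩
  · rw [List.any_eq_false] at h ⊢
    intro w hw hc
    exact h w ((List.contains_iff_mem).mp hc) (by simpa using hw)

lemma main_eq (ks : List String) :
    (if (["deaf", "blind", "sensory", "visual", "hearing"].any (fun k => ks.contains k)) then
      "Pixel Nova or Siri Sage"
    else if (["neurodiverse", "autistic", "adhd", "cognitive"].any (fun k => ks.contains k)) then
      "Zen Circuit"
    else if (["accessibility", "mobility", "wheelchair", "barrier"].any (fun k => ks.contains k)) then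
      "Maya Flux"
    else
      "Any agent")
    = agent_of (ks.foldl rankStep 3) := by
  rw [foldl_rank ks 3 le_rfl]
  have hmin : min (3 : Int) (rankChain ks) = rankChain ks := by
    rcases rankChain_cases ks with h | h | h | h <;> omega
  rw [hmin]
  unfold rankChain agent_of
  rw [any_comm, any_comm, any_comm]
  split_ifs <;> first | rfl | omega

-- ===== VERDICT (by name: the statement is the Claim_ definition above) =====
theorem suggest_agent_py_spec : Claim_equal_suggest_agent_py := by
  intro finding _
  show suggest_agent_py finding = suggest_agent_py_alt finding
  exact main_eq ((PySem.Dict.mk finding).getD "keywords" [])
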